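-- pv_equiv track=rewrite | github.com/joshroybal/Python-Constraint-Satisfaction-Programming | across_the_pond.py | disjoint_lists_p
-- ===== SOURCE A (Python) =====
-- from typing import List, Dict, Optional, Tuple, Set
--
-- def disjoint_lists_p(t: List[List[str]]) -> bool:
--     checked: Set[str] = set()
--     for sublist in t:
--         for string in sublist:
--             if string in checked:
--                 return False
--             checked.add(string)
--     return True
-- ===== SOURCE B (Python) =====
-- from typing import List
--
-- def disjoint_lists_p(t: List[List[str]]) -> bool:
--     flat = sorted(s for sub in t for s in sub)
--     return all(a != b for a, b in zip(flat, flat[1:]))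
-- ===== Notes on version B (the rewrite author's own statement) =====
-- stated objective: alternative
-- what changed: Replaces the incremental hash-set membership loop with early return by sorting the flattened strings and scanning adjacent pairs for equality (no set at all).
import Mathlib
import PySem

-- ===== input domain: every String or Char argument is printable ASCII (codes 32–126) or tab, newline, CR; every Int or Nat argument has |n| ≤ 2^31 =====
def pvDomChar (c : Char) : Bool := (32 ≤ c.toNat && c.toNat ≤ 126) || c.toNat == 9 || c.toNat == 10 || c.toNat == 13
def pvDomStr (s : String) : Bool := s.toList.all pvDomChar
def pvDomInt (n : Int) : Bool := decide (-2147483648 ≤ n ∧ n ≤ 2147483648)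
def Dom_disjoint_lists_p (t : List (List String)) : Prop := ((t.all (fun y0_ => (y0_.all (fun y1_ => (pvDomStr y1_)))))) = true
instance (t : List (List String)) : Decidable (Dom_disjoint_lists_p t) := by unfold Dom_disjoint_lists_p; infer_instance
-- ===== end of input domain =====

-- B replaces A's incremental hash-set membership loop (with early return) by an
-- entirely different mechanism: sort the flattened strings, then scan adjacent
-- pairs for equality; no set is maintained. Objective: alternative algorithm.

-- ===== PORT A =====
-- inner 'for string in sublist' loop; none = the 'return False' early exit
def pvAInner : List String → PySem.Set String → Option (PySem.Set String)
  | [], checked => some checked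
  | s :: rest, checked =>
      if PySem.Set.contains checked s then none
      else pvAInner rest (PySem.Set.add checked s)

-- outer 'for sublist in t' loop threading the 'checked' set
def pvAOuter : List (List String) → PySem.Set String → Bool
  | [], _ => true
  | sub :: rest, checked =>
      match pvAInner sub checked with
      | none => false
      | some c => pvAOuter rest c

def disjoint_lists_p (t : List (List String)) : Bool :=
  pvAOuter t PySem.Set.empty

-- ===== PORT B =====
-- all(a != b for a, b in zip(flat, flat[1:])): scan adjacent pairs
def pvAdj : List String → Bool
  | [] => true
  | [_] => true
  | a :: b :: rest => (a != b) && pvAdj (b :: rest)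

def disjoint_lists_p_alt (t : List (List String)) : Bool :=
  let flat := PySem.List.sorted (t.flatMap id) (fun x => x) false  -- sorted(s for sub in t for s in sub)
  pvAdj flat

-- ===== PRECONDITION & SPEC =====
def Spec_disjoint_lists_p (t : List (List String)) (out : Bool) : Prop := out = disjoint_lists_p_alt t
instance (t : List (List String)) (out : Bool) : Decidable (Spec_disjoint_lists_p t out) := by unfold Spec_disjoint_lists_p; infer_instance

-- ===== CLAIM (what is proved, stated in full; the proofs are below) =====
def Claim_equal_disjoint_lists_p : Prop := ∀ (t : List (List String)), Dom_disjoint_lists_p t → Spec_disjoint_lists_p t (disjoint_lists_p t)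

-- ===== LEMMAS AND PROOFS =====

-- the inner loop, on a nodup 'checked', succeeds iff checked ++ l stays nodup
lemma pvAInner_eq (l : List String) : ∀ (checked : PySem.Set String), checked.Nodup →
    pvAInner l checked = if (checked ++ l).Nodup then some (checked ++ l) else none := by
  induction l with
  | nil => intro checked h; simp [pvAInner, h]
  | cons s rest ih =>
      intro checked h
      by_cases hs : s ∈ checked
      · have : ¬ (checked ++ s :: rest).Nodup := by
          intro hc
          exact (List.disjoint_of_nodup_append hc) hs List.mem_cons_self
        simp [pvAInner, PySem.Set.contains, hs, this]
      · have hadd : PySem.Set.add checked s = checked ++ [s] := by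
          simp [PySem.Set.add, PySem.Set.contains, hs]
        have hnd : (checked ++ [s]).Nodup := by
          simp only [List.nodup_append, List.nodup_cons, List.not_mem_nil,
            not_false_iff, List.nodup_nil, and_true, true_and, h]
          intro a ha b hb
          simp only [List.mem_singleton] at hb
          exact fun hq => hs ((hq.trans hb) ▸ ha)
        rw [show pvAInner (s :: rest) checked = pvAInner rest (PySem.Set.add checked s) by
              simp [pvAInner, PySem.Set.contains, hs],
            hadd, ih (checked ++ [s]) hnd]
        simp [List.append_assoc]

-- the outer loop computes nodup-ness of checked ++ flatten t
lemma pvAOuter_eq (t : List (List String)) : ∀ (checked : PySem.Set String), checked.Nodup →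
    pvAOuter t checked = decide (checked ++ t.flatMap id).Nodup := by
  induction t with
  | nil => intro checked h; simp [pvAOuter, h]
  | cons sub rest ih =>
      intro checked h
      rw [show pvAOuter (sub :: rest) checked =
            match pvAInner sub checked with
            | none => false
            | some c => pvAOuter rest c from rfl,
          pvAInner_eq sub checked h]
      by_cases hnd : (checked ++ sub).Nodup
      · simp only [hnd, if_pos]
        rw [ih (checked ++ sub) hnd]
        simp [List.append_assoc]
      · have : ¬ (checked ++ (sub :: rest).flatMap id).Nodup := by
          intro hc
          exact hnd (hc.sublist (by
            simp only [List.flatMap_cons, id]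
            exact (List.append_sublist_append_left checked).mpr
              (List.sublist_append_left sub _)))
        have this2 : ¬ (checked ++ (sub ++ rest.flatten)).Nodup := by
          simpa [List.flatMap_cons] using this
        simp [hnd, this2]

-- pvAdj is exactly adjacent-distinctness (IsChain (· ≠ ·))
lemma pvAdj_eq_isChain : ∀ (xs : List String), pvAdj xs = decide (xs.IsChain (· ≠ ·))
  | [] => by simp [pvAdj]
  | [_] => by simp [pvAdj]
  | a :: b :: rest => by
      rw [pvAdj, pvAdj_eq_isChain (b :: rest)]
      by_cases hab : a = b <;> simp [List.isChain_cons_cons, hab]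

-- adjacent ≤ and adjacent ≠ give adjacent <
lemma pvIsChain_lt : ∀ (xs : List String), xs.IsChain (· ≤ ·) → xs.IsChain (· ≠ ·) →
    xs.IsChain (· < ·)
  | [], _, _ => List.isChain_nil
  | [_], _, _ => List.isChain_singleton _
  | a :: b :: rest, h1, h2 => by
      rw [List.isChain_cons_cons] at h1 h2 ⊢
      exact ⟨lt_of_le_of_ne h1.1 h2.1, pvIsChain_lt (b :: rest) h1.2 h2.2⟩

-- on an (≤)-sorted list, adjacent-distinct ⟺ no duplicates
lemma pvAdj_sorted_eq_nodup (xs : List String) (h : xs.IsChain (· ≤ ·)) :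
    pvAdj xs = decide xs.Nodup := by
  rw [pvAdj_eq_isChain, decide_eq_decide]
  constructor
  · intro hc
    exact ((List.isChain_iff_pairwise).mp (pvIsChain_lt xs h hc)).imp ne_of_lt
  · intro hn
    exact hn.isChain

-- ===== VERDICT =====
theorem disjoint_lists_p_spec : Claim_equal_disjoint_lists_p := by
  intro t _
  show disjoint_lists_p t = disjoint_lists_p_alt t
  rw [disjoint_lists_p, pvAOuter_eq t PySem.Set.empty List.nodup_nil]
  show _ = pvAdj (PySem.List.sorted (t.flatMap id) (fun x => x) false)
  rw [pvAdj_sorted_eq_nodup _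
        ((PySem.List.sorted_pairwise (t.flatMap id) (fun x => x)).isChain),
      decide_eq_decide]
  simp only [PySem.Set.empty, List.nil_append]
  exact ((PySem.List.sorted_perm (t.flatMap id) (fun x => x) false).nodup_iff).symm
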